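-- pv_equiv track=rewrite | github.com/banggeunho/CodingTest | 프로그래머스/2023/Jan/[카카오]이모티콘 할인.py | solution
-- ===== SOURCE A (Python) =====
-- from itertools import product
--
-- def solution(users, emoticons):
--     discount_rates = [10, 20, 30, 40]
--     discount_cases = list(product(discount_rates, repeat=len(emoticons)))
--     result_cases = []
--
--     for discount_case in discount_cases:
--         result = [0,0]
--         for want_rate, money in users:
--             purchase_money = 0
--             for discount_rate, emoticon_price in zip(list(discount_case), emoticons):
--                 # 할인율이 높은게 있다면 구매
--                 if want_rate <= discount_rate:
--                     purchase_money += emoticon_price * (100 - discount_rate) // 100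
--
--             # 이모티콘 플러스 구독 / 구매 취소
--             if purchase_money >= money:
--                 result[0] += 1
--             # 이모티콘 구매가격 더하기
--             else:
--                 result[1] += purchase_money
--         # 결과 저장
--         result_cases.append(result)
--
--     # 정렬
--     result_cases.sort(key=lambda x:(-x[0], -x[1]))
--     return result_cases[0]
-- ===== SOURCE B (Python) =====
-- def solution(users, emoticons):
--     # DFS over discount choices (10/20/30/40 per emoticon), sharing each user's
--     # partial spend across combinations with a common prefix; tracks the single
--     # best (subscriptions, revenue) pair instead of collecting and sorting.
--     n = len(emoticons)
--     best = None
--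
--     def dfs(i, spend):
--         nonlocal best
--         if i == n:
--             subs = 0
--             rev = 0
--             for (want, money), p in zip(users, spend):
--                 if p >= money:
--                     subs += 1
--                 else:
--                     rev += p
--             if best is None or (subs, rev) > best:
--                 best = (subs, rev)
--             return
--         price = emoticons[i]
--         for rate in (10, 20, 30, 40):
--             dfs(i + 1, [p + (price * (100 - rate) // 100 if want <= rate else 0)
--                         for (want, _), p in zip(users, spend)])
--
--     dfs(0, [0] * len(users))
--     return list(best)
-- ===== Notes on version B (the rewrite author's own statement) =====
-- stated objective: faster
-- what changed: Replaces 'evaluate all 4^n discount combinations, append each (subs, revenue) to a list, sort it and take [0]' with a DFS over per-emoticon discount choices that shares each user's partial spend across combinations with a common prefix and keeps only the single running best pair (strict lexicographic improvement, so the earliest combination still wins ties).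
import Mathlib
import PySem

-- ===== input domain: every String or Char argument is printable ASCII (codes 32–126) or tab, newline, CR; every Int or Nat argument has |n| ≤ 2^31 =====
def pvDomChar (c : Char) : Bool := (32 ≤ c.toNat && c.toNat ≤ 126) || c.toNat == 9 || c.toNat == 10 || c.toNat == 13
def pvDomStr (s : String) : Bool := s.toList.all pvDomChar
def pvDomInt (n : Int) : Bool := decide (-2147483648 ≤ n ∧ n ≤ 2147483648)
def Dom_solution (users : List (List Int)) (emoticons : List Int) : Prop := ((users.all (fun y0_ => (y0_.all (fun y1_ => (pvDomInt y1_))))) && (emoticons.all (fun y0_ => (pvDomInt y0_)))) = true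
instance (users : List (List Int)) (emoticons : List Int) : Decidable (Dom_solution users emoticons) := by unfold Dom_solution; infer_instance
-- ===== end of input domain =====

-- B replaces "evaluate every discount combination, append to a list, sort, take [0]"
-- by a DFS over the per-emoticon discount choices that shares each user's partial
-- spend across combinations with a common prefix and keeps only the single running
-- best (subscriptions, revenue) pair, removing the result list and the sort.

-- ===== PORT A =====
-- list(itertools.product([10,20,30,40], repeat=n)): rightmost position varies fastest
def pvProd (rs : List Int) : Nat → List (List Int)
  | 0 => [[]]
  | n + 1 => rs.flatMap (fun r => (pvProd rs n).map (fun dc => r :: dc))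

-- the ordering of result_cases.sort(key=lambda x:(-x[0],-x[1])): 'a comes before b'
def pyKeyLe (a b : Int × Int) : Bool := decide (b.1 < a.1 ∨ (a.1 = b.1 ∧ b.2 ≤ a.2))

-- the two-slot list result=[subs,rev] is carried as the pair (subs,rev); returned as [r.1, r.2]
def solution (users : List (List Int)) (emoticons : List Int) : List Int :=
  let discount_rates : List Int := [10, 20, 30, 40]
  let discount_cases := pvProd discount_rates emoticons.length
  -- the loop appends exactly one result per discount_case: one map
  let result_cases : List (Int × Int) := discount_cases.map (fun discount_case =>
    users.foldl (fun result user =>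
      match user with
      | want_rate :: money :: [] =>
        let purchase_money := (discount_case.zip emoticons).foldl
          (fun pm dp => if want_rate ≤ dp.1 then pm + PySem.Int.floordiv (dp.2 * (100 - dp.1)) 100 else pm) 0
        if purchase_money ≥ money then (result.1 + 1, result.2) else (result.1, result.2 + purchase_money)
      | _ => result  -- Python ValueError (unpacking a user that is not an exact pair); excluded by Pre_solution
      ) ((0 : Int), (0 : Int)))
  -- result_cases.sort(key=lambda x:(-x[0],-x[1])): Python's stable sort, ported by hand as the
  -- stable List.mergeSort under the same key comparison; exact, since pyKeyLe is antisymmetric on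
  -- the (subs, revenue) pairs (elements tied under the key are equal values), so every stable —
  -- indeed every — sort under this comparison produces the same list of values.
  match result_cases.mergeSort pyKeyLe with
  | r :: _ => [r.1, r.2]
  | [] => []  -- result_cases[0] IndexError branch; unreachable: the product list is never empty

-- ===== PORT B =====
-- dfs(i, spend): recursion on the remaining emoticons, spend = per-user partial purchase money
def dfsB (users : List (List Int)) : List Int → List Int → Option (Int × Int) → Option (Int × Int)
  | [], spend, best =>
      let sr := (users.zip spend).foldl (fun (sr : Int × Int) up =>
        match up with
        | (_ :: money :: tail, p) =>
          if tail.isEmpty then (if p ≥ money then (sr.1 + 1, sr.2) else (sr.1, sr.2 + p))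
          else sr  -- Python ValueError (user longer than a pair); excluded by Pre_solution
        | ([_], _) => sr  -- likewise ValueError
        | ([], _) => sr  -- likewise ValueError
        ) ((0 : Int), (0 : Int))
      match best with
      | none => some sr
      | some b => if b.1 < sr.1 ∨ (b.1 = sr.1 ∧ b.2 < sr.2) then some sr else some b
  | price :: rest, spend, best =>
      ([10, 20, 30, 40] : List Int).foldl (fun b rate =>
        dfsB users rest ((users.zip spend).map (fun up =>
          match up with
          | (want :: _, p) => p + (if want ≤ rate then PySem.Int.floordiv (price * (100 - rate)) 100 else 0)
          | ([], p) => p  -- Python ValueError (empty user); excluded by Pre_solution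
          )) b) best

def solution_alt (users : List (List Int)) (emoticons : List Int) : List Int :=
  match dfsB users emoticons (List.replicate users.length 0) none with
  | some b => [b.1, b.2]
  | none => []  -- unreachable: the DFS always records at least one leaf

-- ===== PRECONDITION & SPEC =====
-- Pre_ excludes only the users that are not exact [want_rate, money] pairs, on which
-- both Pythons raise ValueError while unpacking 'for want_rate, money in users'.
def Pre_solution (users : List (List Int)) (emoticons : List Int) : Prop :=
  (users.all (fun u => u.length == 2)) = true
instance (users : List (List Int)) (emoticons : List Int) : Decidable (Pre_solution users emoticons) := by unfold Pre_solution; infer_instance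

def pvWitness_solution : List (List Int) × List Int := ([[40, 100], [25, 1000]], [100, 200])

def Spec_solution (users : List (List Int)) (emoticons : List Int) (out : List Int) : Prop := out = solution_alt users emoticons
instance (users : List (List Int)) (emoticons : List Int) (out : List Int) : Decidable (Spec_solution users emoticons out) := by unfold Spec_solution; infer_instance

-- ===== CLAIM (what is proved, stated in full; the proofs are below) =====
def Claim_equal_solution : Prop := ∀ (users : List (List Int)) (emoticons : List Int), Dom_solution users emoticons → Pre_solution users emoticons → Spec_solution users emoticons (solution users emoticons)

-- ===== LEMMAS AND PROOFS =====

def purch (want : Int) (dc ems : List Int) : Int :=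
  (dc.zip ems).foldl (fun pm dp => if want ≤ dp.1 then pm + PySem.Int.floordiv (dp.2 * (100 - dp.1)) 100 else pm) 0

def evalP (users : List (List Int)) (g : List Int → Int) : Int × Int :=
  users.foldl (fun r u => match u with
    | _ :: m :: [] => if g u ≥ m then (r.1 + 1, r.2) else (r.1, r.2 + g u)
    | _ => r) ((0 : Int), (0 : Int))

def updB (b : Option (Int × Int)) (x : Int × Int) : Option (Int × Int) :=
  match b with
  | none => some x
  | some b => if b.1 < x.1 ∨ (b.1 = x.1 ∧ b.2 < x.2) then some x else some b

-- the running-best step on bare pairs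
def updP (b x : Int × Int) : Int × Int :=
  if b.1 < x.1 ∨ (b.1 = x.1 ∧ b.2 < x.2) then x else b

-- 'm is a pyKeyLe-minimum of l' (= comes first in the sorted order)
def IsMinP (l : List (Int × Int)) (m : Int × Int) : Prop :=
  m ∈ l ∧ ∀ y ∈ l, pyKeyLe m y = true

theorem pyKeyLe_trans (a b c : Int × Int) (h1 : pyKeyLe a b = true) (h2 : pyKeyLe b c = true) :
    pyKeyLe a c = true := by
  simp only [pyKeyLe, decide_eq_true_eq] at *
  omega

theorem pyKeyLe_total (a b : Int × Int) : (pyKeyLe a b || pyKeyLe b a) = true := by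
  simp only [pyKeyLe, Bool.or_eq_true, decide_eq_true_eq]
  omega

theorem pyKeyLe_antisymm (a b : Int × Int) (h1 : pyKeyLe a b = true) (h2 : pyKeyLe b a = true) :
    a = b := by
  simp only [pyKeyLe, decide_eq_true_eq] at h1 h2
  have : a.1 = b.1 ∧ a.2 = b.2 := by omega
  exact Prod.ext this.1 this.2

theorem pyKeyLe_refl (a : Int × Int) : pyKeyLe a a = true := by
  simp [pyKeyLe]

theorem updP_le_left (b x : Int × Int) : pyKeyLe (updP b x) b = true := by
  unfold updP
  split
  · simp only [pyKeyLe, decide_eq_true_eq]; omega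
  · exact pyKeyLe_refl b

theorem updP_le_right (b x : Int × Int) : pyKeyLe (updP b x) x = true := by
  unfold updP
  split
  · exact pyKeyLe_refl x
  · simp only [pyKeyLe, decide_eq_true_eq]; omega

theorem updP_mem (b x : Int × Int) : updP b x = b ∨ updP b x = x := by
  unfold updP; split
  · right; rfl
  · left; rfl

theorem fold_min (l : List (Int × Int)) : ∀ x : Int × Int, IsMinP (x :: l) (l.foldl updP x) := by
  induction l with
  | nil =>
    intro x
    exact ⟨List.mem_singleton.mpr rfl, by
      intro y hy
      rw [List.mem_singleton.mp hy]
      exact pyKeyLe_refl x⟩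
  | cons y t ih =>
    intro x
    simp only [List.foldl_cons]
    obtain ⟨hmem, hmin⟩ := ih (updP x y)
    constructor
    · rcases List.mem_cons.mp hmem with h | h
      · rcases updP_mem x y with hxy | hxy
        · rw [h, hxy]; exact List.mem_cons_self
        · rw [h, hxy]; exact List.mem_cons_of_mem _ List.mem_cons_self
      · exact List.mem_cons_of_mem _ (List.mem_cons_of_mem _ h)
    · intro z hz
      have hle_upd : pyKeyLe (t.foldl updP (updP x y)) (updP x y) = true :=
        hmin _ List.mem_cons_self
      rcases List.mem_cons.mp hz with h | h
      · rw [h]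
        exact pyKeyLe_trans _ _ _ hle_upd (updP_le_left x y)
      · rcases List.mem_cons.mp h with h2 | h2
        · rw [h2]
          exact pyKeyLe_trans _ _ _ hle_upd (updP_le_right x y)
        · exact hmin _ (List.mem_cons_of_mem _ h2)

theorem sorted_head_min (l : List (Int × Int)) (m : Int × Int) (t : List (Int × Int))
    (h : l.mergeSort pyKeyLe = m :: t) : IsMinP l m := by
  have hperm : List.Perm (l.mergeSort pyKeyLe) l := List.mergeSort_perm l pyKeyLe
  constructor
  · exact hperm.mem_iff.mp (h ▸ List.mem_cons_self)
  · intro y hy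
    have hy' : y ∈ m :: t := h ▸ hperm.mem_iff.mpr hy
    rcases List.mem_cons.mp hy' with h2 | h2
    · rw [h2]; exact pyKeyLe_refl m
    · have hs := List.pairwise_mergeSort pyKeyLe_trans pyKeyLe_total l
      rw [h] at hs
      exact (List.pairwise_cons.mp hs).1 y h2

theorem min_uniq (l : List (Int × Int)) (m m' : Int × Int)
    (h : IsMinP l m) (h' : IsMinP l m') : m = m' :=
  pyKeyLe_antisymm m m' (h.2 m' h'.1) (h'.2 m h.1)

theorem mergeSort_ne_nil (x : Int × Int) (l : List (Int × Int)) :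
    (x :: l).mergeSort pyKeyLe ≠ [] := by
  intro h
  have := (List.mergeSort_perm (x :: l) pyKeyLe).length_eq
  rw [h] at this
  simp at this

theorem purch_shift (want : Int) (l : List (Int × Int)) : ∀ s : Int,
    l.foldl (fun pm dp => if want ≤ dp.1 then pm + PySem.Int.floordiv (dp.2 * (100 - dp.1)) 100 else pm) s
      = s + l.foldl (fun pm dp => if want ≤ dp.1 then pm + PySem.Int.floordiv (dp.2 * (100 - dp.1)) 100 else pm) 0 := by
  induction l with
  | nil => simp
  | cons dp l ih =>
    intro s
    simp only [List.foldl_cons]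
    rw [ih, ih (if want ≤ dp.1 then 0 + _ else 0)]
    split <;> ring

theorem purch_cons (want r p : Int) (dc ems : List Int) :
    purch want (r :: dc) (p :: ems)
      = (if want ≤ r then PySem.Int.floordiv (p * (100 - r)) 100 else 0) + purch want dc ems := by
  unfold purch
  simp only [List.zip_cons_cons, List.foldl_cons]
  rw [purch_shift]
  split <;> ring

theorem evalP_congr (users : List (List Int)) (g₁ g₂ : List Int → Int)
    (h : ∀ u ∈ users, g₁ u = g₂ u) : evalP users g₁ = evalP users g₂ := by
  unfold evalP
  apply PySem.List.foldl_congr_mem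
  intro acc u hu
  match u with
  | [] => rfl
  | [_] => rfl
  | _ :: _ :: _ :: _ => rfl
  | w :: m :: [] => rw [h _ hu]

theorem zip_map_self (users : List (List Int)) (base : List Int → Int) :
    users.zip (users.map base) = users.map (fun u => (u, base u)) := by
  induction users with
  | nil => rfl
  | cons u us ih => simp [ih]

theorem foldl_flatMap {α β γ : Type} (l : List α) (g : α → List β) (F : γ → β → γ) (init : γ) :
    (l.flatMap g).foldl F init = l.foldl (fun acc r => (g r).foldl F acc) init := by
  induction l generalizing init with
  | nil => rfl
  | cons r l ih => simp [List.flatMap_cons, List.foldl_append, ih]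

theorem dfs_fold (users : List (List Int)) (hu : ∀ u ∈ users, u.length = 2) :
    ∀ (ems : List Int) (base : List Int → Int) (best : Option (Int × Int)),
    dfsB users ems (users.map base) best
      = (pvProd [10, 20, 30, 40] ems.length).foldl
          (fun b dc => updB b (evalP users (fun u => base u + purch (u.headD 0) dc ems))) best := by
  intro ems
  induction ems with
  | nil =>
    intro base best
    show (match best with
      | none => some _
      | some b => _) = _
    have hsr : ((users.zip (users.map base)).foldl (fun (sr : Int × Int) up =>
        match up with
        | (_ :: money :: tail, p) =>
          if tail.isEmpty then (if p ≥ money then (sr.1 + 1, sr.2) else (sr.1, sr.2 + p))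
          else sr
        | ([_], _) => sr
        | ([], _) => sr) ((0 : Int), (0 : Int)))
        = evalP users (fun u => base u + purch (u.headD 0) [] []) := by
      rw [zip_map_self, List.foldl_map]
      have := evalP_congr users (fun u => base u + purch (u.headD 0) [] []) base (by
        intro u _; show base u + 0 = base u; ring)
      rw [this]
      unfold evalP
      apply PySem.List.foldl_congr_mem
      intro acc u _
      match u with
      | [] => rfl
      | [_] => rfl
      | _ :: _ :: _ :: _ => rfl
      | w :: m :: [] => rfl
    rw [hsr]
    rfl
  | cons price rest ih =>
    intro base best
    show ([10, 20, 30, 40] : List Int).foldl _ best = _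
    have hrhs : (pvProd [10, 20, 30, 40] (price :: rest).length).foldl
          (fun b dc => updB b (evalP users (fun u => base u + purch (u.headD 0) dc (price :: rest)))) best
        = ([10, 20, 30, 40] : List Int).foldl (fun b r =>
            (pvProd [10, 20, 30, 40] rest.length).foldl
              (fun b dc => updB b (evalP users (fun u => base u + purch (u.headD 0) (r :: dc) (price :: rest)))) b) best := by
      show (List.flatMap _ _).foldl _ _ = _
      rw [foldl_flatMap]
      apply PySem.List.foldl_congr_mem
      intro acc r _
      rw [List.foldl_map]
    rw [hrhs]
    apply PySem.List.foldl_congr_mem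
    intro b rate _
    have hspend : ((users.zip (users.map base)).map (fun up =>
          match up with
          | (want :: _, p) => p + (if want ≤ rate then PySem.Int.floordiv (price * (100 - rate)) 100 else 0)
          | ([], p) => p))
        = users.map (fun u => base u + (if u.headD 0 ≤ rate then PySem.Int.floordiv (price * (100 - rate)) 100 else 0)) := by
      rw [zip_map_self, List.map_map]
      apply List.map_congr_left
      intro u hmem
      obtain ⟨w, m, hwm⟩ : ∃ w m, u = [w, m] := by
        have := hu u hmem
        match u with
        | [a, b] => exact ⟨a, b, rfl⟩
      subst hwm
      rfl
    rw [hspend, ih]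
    apply PySem.List.foldl_congr_mem
    intro acc dc _
    congr 1
    apply evalP_congr
    intro u _
    rw [purch_cons]
    ring

theorem foldl_updB (l : List (Int × Int)) : ∀ x : Int × Int,
    l.foldl updB (some x) = some (l.foldl updP x) := by
  induction l with
  | nil => intro x; rfl
  | cons y l ih =>
    intro x
    simp only [List.foldl_cons]
    have : updB (some x) y = some (updP x y) := by
      by_cases h : x.1 < y.1 ∨ (x.1 = y.1 ∧ x.2 < y.2)
      · simp [updB, updP, h]
      · simp [updB, updP, h]
    rw [this, ih]

theorem pvProd_ne_nil (n : Nat) : pvProd [10, 20, 30, 40] n ≠ [] := by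
  induction n with
  | zero => simp [pvProd]
  | succ n ih =>
    simp only [pvProd, List.flatMap_cons, ne_eq, List.append_eq_nil_iff, List.map_eq_nil_iff]
    intro h
    exact ih h.1

-- ===== VERDICT (by name: the statement is the Claim_ definition above) =====
theorem solution_spec : Claim_equal_solution := by
  intro users ems _hdom hpre
  have hu : ∀ u ∈ users, u.length = 2 := by
    intro u hmem
    have := (List.all_eq_true.mp hpre) u hmem
    simpa using this
  show solution users ems = solution_alt users ems
  obtain ⟨dc0, ct, hc⟩ := List.ne_nil_iff_exists_cons.mp (pvProd_ne_nil ems.length)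
  -- A side
  have hA : solution users ems
      = match ((pvProd [10,20,30,40] ems.length).map
            (fun dc => evalP users (fun u => purch (u.headD 0) dc ems))).mergeSort pyKeyLe with
        | r :: _ => [r.1, r.2]
        | [] => [] := by
    unfold solution
    simp only []
    congr 2
    apply List.map_congr_left
    intro dc _
    unfold evalP
    apply PySem.List.foldl_congr_mem
    intro acc u _
    match u with
    | [] => rfl
    | [_] => rfl
    | _ :: _ :: _ :: _ => rfl
    | w :: m :: [] => rfl
  -- B side
  have hrep : (List.replicate users.length (0:Int)) = users.map (fun _ => (0:Int)) := by
    simp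
  have hB1 : dfsB users ems (users.map (fun _ => (0:Int))) none
      = (pvProd [10,20,30,40] ems.length).foldl
          (fun b dc => updB b (evalP users (fun u => purch (u.headD 0) dc ems))) none := by
    rw [dfs_fold users hu ems (fun _ => (0:Int)) none]
    apply PySem.List.foldl_congr_mem
    intro b dc _
    congr 1
    apply evalP_congr
    intro u _
    show (0:Int) + _ = _
    ring
  have hB2 : (pvProd [10,20,30,40] ems.length).foldl
        (fun b dc => updB b (evalP users (fun u => purch (u.headD 0) dc ems))) none
      = ((pvProd [10,20,30,40] ems.length).map
          (fun dc => evalP users (fun u => purch (u.headD 0) dc ems))).foldl updB none := by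
    rw [List.foldl_map]
  have hB : solution_alt users ems
      = match ((pvProd [10,20,30,40] ems.length).map
          (fun dc => evalP users (fun u => purch (u.headD 0) dc ems))).foldl updB none with
        | some b => [b.1, b.2]
        | none => [] := by
    unfold solution_alt
    rw [hrep, hB1, hB2]
  rw [hA, hB, hc]
  simp only [List.map_cons, List.foldl_cons]
  rw [show updB none (evalP users fun u => purch (u.headD 0) dc0 ems)
      = some (evalP users fun u => purch (u.headD 0) dc0 ems) from rfl]
  rw [foldl_updB]
  -- the head of the sorted list is the unique pyKeyLe-minimum, which the fold computes
  set e0 := evalP users fun u => purch (u.headD 0) dc0 ems with he0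
  set es := ct.map (fun dc => evalP users (fun u => purch (u.headD 0) dc ems)) with hes
  obtain ⟨m, t, hms⟩ : ∃ m t, (e0 :: es).mergeSort pyKeyLe = m :: t := by
    cases hms : (e0 :: es).mergeSort pyKeyLe with
    | nil => exact absurd hms (mergeSort_ne_nil e0 es)
    | cons m t => exact ⟨m, t, rfl⟩
  rw [hms]
  have hm : m = es.foldl updP e0 :=
    min_uniq (e0 :: es) m (es.foldl updP e0) (sorted_head_min _ m t hms) (fold_min es e0)
  rw [hm]
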